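-- pv_equiv track=rewrite | github.com/NoviceCoderInfinity/DSA_CP | leetcode/problem_statement_README_formatter.py | parse_and_format_problem
-- ===== SOURCE A (Python) =====
-- def parse_and_format_problem(problem_text):
--     # List of keywords that denote the start of new sections
--     keywords = ["Easy", "Medium", "Hard", "Example", "Constraints"]
--
--     # Initialize variables for storing sections
--     problem_id = ""
--     title = ""
--     difficulty = ""
--     topics = ""
--     problem_description = ""
--     examples = []
--     constraints = ""
--
--     # Flags to keep track of which section we're in
--     current_section = "title"
--
--     # Process the text word by word
--     words = problem_text.split()
--     i = 0
--     while i < len(words):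
--         word = words[i]
--
--         # Determine section by checking keywords
--         if word in ["Easy", "Medium", "Hard"]:
--             difficulty = word
--             current_section = "topics"  # After difficulty, expect topics or problem description
--             i += 1
--             continue
--
--         elif word.startswith("Example"):
--             example_text = ' '.join(words[i:]).split("Constraints")[0].strip()
--             examples.append(example_text)
--             current_section = "constraints"
--             break
--
--         elif word == "Constraints:":
--             constraints = ' '.join(words[i:])
--             break
--
--         # Accumulate text based on current section
--         if current_section == "title":
--             problem_id += word + " "
--         elif current_section == "topics":
--             topics += word + " "
--         elif current_section == "problem_description":
--             problem_description += word + " "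
--
--         i += 1
--
--     # Clean up extracted data
--     problem_id = problem_id.strip()
--     title = ' '.join(problem_id.split()[1:])
--     problem_id = problem_id.split()[0]
--     topics = topics.replace("Topics", "").strip()
--     problem_description = problem_description.strip()
--
--     # Format the output
--     formatted_output = f"### {problem_id}. {title}\n"
--     formatted_output += f"**Difficulty:** {difficulty}\n"
--     formatted_output += f"**Topics:** {topics if topics else 'None provided'}\n\n"
--     formatted_output += "### Problem Description\n\n"
--     formatted_output += problem_description + '\n\n'
--
--     for i, example in enumerate(examples):
--         formatted_output += f"**Example {i + 1}:**\n\n"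
--         formatted_output += f"```text\n{example.strip()}\n```\n\n"
--
--     if constraints:
--         formatted_output += "### Constraints\n\n"
--         formatted_output += constraints.strip() + '\n'
--
--     return formatted_output
-- ===== SOURCE B (Python) =====
-- def parse_and_format_problem(problem_text):
--     # Slice-based reimplementation: locate section boundaries up front, then
--     # build the output from word-list slices instead of a stateful word loop.
--     words = problem_text.split()
--     DIFF = ("Easy", "Medium", "Hard")
--
--     def stop(w):
--         return w.startswith("Example") or w == "Constraints:"
--
--     e = len(words)                      # first example/constraints token
--     for i, w in enumerate(words):
--         if stop(w):
--             e = i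
--             break
--     head, tail = words[:e], words[e:]
--
--     d = len(head)                       # first difficulty keyword in head
--     for i, w in enumerate(head):
--         if w in DIFF:
--             d = i
--             break
--     id_words = head[:d]
--     diffs = [w for w in head if w in DIFF]
--     difficulty = diffs[-1] if diffs else ""
--     topics = ' '.join(w for w in head[d:] if w not in DIFF).replace("Topics", "").strip()
--
--     problem_id = id_words[0]            # raises IndexError on empty id region, like A
--     title = ' '.join(id_words[1:])
--
--     out = [f"### {problem_id}. {title}\n",
--            f"**Difficulty:** {difficulty}\n",
--            f"**Topics:** {topics if topics else 'None provided'}\n\n",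
--            "### Problem Description\n\n",
--            "\n\n"]
--     if tail:
--         if tail[0] == "Constraints:":
--             out.append("### Constraints\n\n" + ' '.join(tail).strip() + '\n')
--         else:
--             example = ' '.join(tail).split("Constraints")[0].strip()
--             out.append(f"**Example 1:**\n\n```text\n{example}\n```\n\n")
--     return ''.join(out)
-- ===== Notes on version B (the rewrite author's own statement) =====
-- stated objective: faster
-- what changed: Instead of threading a current_section state variable through a word-by-word loop that accumulates sections by repeated string concatenation, B locates the two boundaries up front (first Example*/'Constraints:' token, first difficulty keyword before it), slices the word list into id/title, topics and tail regions, and joins each region once.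
-- outside the precondition, e.g. on parse_and_format_problem('Constraints:'): A raises IndexError, B raises IndexError
import Mathlib
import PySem

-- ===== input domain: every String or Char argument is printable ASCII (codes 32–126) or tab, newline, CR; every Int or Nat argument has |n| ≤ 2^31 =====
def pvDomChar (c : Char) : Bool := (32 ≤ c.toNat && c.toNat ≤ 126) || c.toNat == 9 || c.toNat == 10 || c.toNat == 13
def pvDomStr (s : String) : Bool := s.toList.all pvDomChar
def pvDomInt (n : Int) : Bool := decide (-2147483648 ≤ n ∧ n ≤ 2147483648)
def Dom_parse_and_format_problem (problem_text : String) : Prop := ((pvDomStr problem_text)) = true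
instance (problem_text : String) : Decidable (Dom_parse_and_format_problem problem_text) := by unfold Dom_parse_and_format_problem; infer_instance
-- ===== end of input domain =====

-- ===== PORT A =====
-- Port of A: one stateful pass over the words, accumulating sections by string concatenation.
-- B changes the decomposition: boundaries are located up front and the word list is sliced, one join per region instead of per-word += accumulation.
def pvAEx (l : List (List Char)) : List Char :=
  PySem.Chars.strip ((PySem.Chars.splitOn (PySem.Chars.join [' '] l) "Constraints".toList).headD [])

def pvALoop (sec : String) (diff pid topics pdesc : List Char) :
    List (List Char) → List Char × List Char × List Char × List Char × List (List Char) × List Char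
  | [] => (diff, pid, topics, pdesc, [], [])
  | w :: rest =>
    if w = "Easy".toList ∨ w = "Medium".toList ∨ w = "Hard".toList then
      pvALoop "topics" w pid topics pdesc rest
    else if PySem.Chars.startswith w "Example".toList then
      (diff, pid, topics, pdesc, [pvAEx (w :: rest)], [])
    else if w = "Constraints:".toList then
      (diff, pid, topics, pdesc, [], PySem.Chars.join [' '] (w :: rest))
    else if sec = "title" then pvALoop sec diff (pid ++ w ++ [' ']) topics pdesc rest
    else if sec = "topics" then pvALoop sec diff pid (topics ++ w ++ [' ']) pdesc rest
    else if sec = "problem_description" then pvALoop sec diff pid topics (pdesc ++ w ++ [' ']) rest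
    else pvALoop sec diff pid topics pdesc rest

def parse_and_format_problem (problem_text : String) : String :=
  let words := PySem.Chars.split₀ problem_text.toList
  let r := pvALoop "title" [] [] [] [] words
  let diff := r.1
  let pid0 := r.2.1
  let topics0 := r.2.2.1
  let pdesc0 := r.2.2.2.1
  let examples := r.2.2.2.2.1
  let constraints := r.2.2.2.2.2
  let pid1 := PySem.Chars.strip pid0
  let parts := PySem.Chars.split₀ pid1
  let title := PySem.Chars.join [' '] (parts.drop 1)
  let problem_id := parts.headD []   -- problem_id.split()[0]: IndexError on empty — outside Pre_
  let topics := PySem.Chars.strip (PySem.Chars.replace topics0 "Topics".toList [])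
  let pdesc := PySem.Chars.strip pdesc0
  let out1 := "### ".toList ++ problem_id ++ ". ".toList ++ title ++ "\n".toList
      ++ "**Difficulty:** ".toList ++ diff ++ "\n".toList
      ++ "**Topics:** ".toList ++ (if topics ≠ [] then topics else "None provided".toList)
      ++ "\n\n".toList ++ "### Problem Description\n\n".toList ++ pdesc ++ "\n\n".toList
  let out2 := (PySem.List.enumerate examples 0).foldl (fun acc p =>
      acc ++ "**Example ".toList ++ PySem.Int.toChars (p.1 + 1) ++ ":**\n\n".toList
        ++ "```text\n".toList ++ PySem.Chars.strip p.2 ++ "\n```\n\n".toList) out1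
  let out3 := if constraints ≠ [] then
      out2 ++ "### Constraints\n\n".toList ++ PySem.Chars.strip constraints ++ "\n".toList
    else out2
  String.ofList out3

-- ===== PORT B =====
def pvBStop (w : List Char) : Bool :=
  PySem.Chars.startswith w "Example".toList || w = "Constraints:".toList

def pvBDiff (w : List Char) : Bool :=
  w = "Easy".toList || w = "Medium".toList || w = "Hard".toList

def parse_and_format_problem_alt (problem_text : String) : String :=
  let words := PySem.Chars.split₀ problem_text.toList
  let head := words.takeWhile (fun w => !pvBStop w)      -- words[:e], e = first Example*/'Constraints:' index
  let tail := words.dropWhile (fun w => !pvBStop w)      -- words[e:]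
  let id_words := head.takeWhile (fun w => !pvBDiff w)   -- head[:d], d = first difficulty index
  let topicRegion := head.dropWhile (fun w => !pvBDiff w)  -- head[d:]
  let diffs := head.filter pvBDiff
  let difficulty := diffs.getLastD []                     -- diffs[-1] if diffs else ""
  let topics := PySem.Chars.strip (PySem.Chars.replace
      (PySem.Chars.join [' '] (topicRegion.filter (fun w => !pvBDiff w))) "Topics".toList [])
  let problem_id := id_words.headD []   -- id_words[0]: IndexError on empty — outside Pre_
  let title := PySem.Chars.join [' '] (id_words.drop 1)
  let base := "### ".toList ++ problem_id ++ ". ".toList ++ title ++ "\n".toList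
      ++ "**Difficulty:** ".toList ++ difficulty ++ "\n".toList
      ++ "**Topics:** ".toList ++ (if topics ≠ [] then topics else "None provided".toList)
      ++ "\n\n".toList ++ "### Problem Description\n\n".toList ++ "\n\n".toList
  let out := match tail with
    | [] => base
    | w :: _ =>
      if w = "Constraints:".toList then
        base ++ "### Constraints\n\n".toList
          ++ PySem.Chars.strip (PySem.Chars.join [' '] tail) ++ "\n".toList
      else
        base ++ "**Example 1:**\n\n```text\n".toList
          ++ PySem.Chars.strip ((PySem.Chars.splitOn (PySem.Chars.join [' '] tail) "Constraints".toList).headD [])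
          ++ "\n```\n\n".toList
  String.ofList out

-- ===== PRECONDITION & SPEC =====
-- Pre_ excludes exactly the inputs where A raises IndexError (problem_id.split()[0] on an empty
-- id region): no words, or the first word is a difficulty keyword / an Example* token / 'Constraints:'.
def Pre_parse_and_format_problem (problem_text : String) : Prop :=
  PySem.Chars.split₀ problem_text.toList ≠ [] ∧
  (let w := (PySem.Chars.split₀ problem_text.toList).headD []
   ¬(w = "Easy".toList ∨ w = "Medium".toList ∨ w = "Hard".toList) ∧
   PySem.Chars.startswith w "Example".toList = false ∧ w ≠ "Constraints:".toList)

instance (problem_text : String) : Decidable (Pre_parse_and_format_problem problem_text) := by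
  unfold Pre_parse_and_format_problem; infer_instance

def pvWitness_parse_and_format_problem : String :=
  "1. Two Sum Easy Topics Array Example 1: Input: nums Constraints: 2 <= n"

def Spec_parse_and_format_problem (problem_text : String) (out : String) : Prop := out = parse_and_format_problem_alt problem_text
instance (problem_text : String) (out : String) : Decidable (Spec_parse_and_format_problem problem_text out) := by unfold Spec_parse_and_format_problem; infer_instance

-- ===== CLAIM (what is proved, stated in full; the proofs are below) =====
def Claim_equal_parse_and_format_problem : Prop := ∀ (problem_text : String), Dom_parse_and_format_problem problem_text → Pre_parse_and_format_problem problem_text → Spec_parse_and_format_problem problem_text (parse_and_format_problem problem_text)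

-- ===== LEMMAS AND PROOFS =====

-- good words: nonempty, whitespace-free (what str.split() produces)
def pvGood (w : List Char) : Prop := w ≠ [] ∧ ∀ c ∈ w, PySem.Chars.isspace c = false

-- words produced by split() are good
lemma pvSplit₀_go_good (s : List Char) : ∀ cur acc,
    (∀ c ∈ cur, PySem.Chars.isspace c = false) → (∀ w ∈ acc, pvGood w) →
    ∀ w ∈ PySem.Chars.split₀.go s cur acc, pvGood w := by
  induction s with
  | nil =>
    intro cur acc hcur hacc w hw
    by_cases h : cur.isEmpty
    · simp [PySem.Chars.split₀.go, h] at hw; exact hacc _ hw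
    · simp [PySem.Chars.split₀.go, h] at hw
      rcases hw with hw | hw
      · exact hacc _ hw
      · subst hw
        refine ⟨by simpa [List.isEmpty_iff] using h, ?_⟩
        intro c hc; exact hcur c (by simpa using hc)
  | cons c rest ih =>
    intro cur acc hcur hacc w hw
    by_cases hsp : PySem.Chars.isspace c
    · by_cases h : cur.isEmpty
      · simp only [PySem.Chars.split₀.go, hsp, h, if_true] at hw
        exact ih [] acc (by simp) hacc w hw
      · simp only [PySem.Chars.split₀.go, hsp, h, if_true, if_false] at hw
        refine ih [] _ (by simp) ?_ w hw
        intro v hv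
        rcases List.mem_cons.mp hv with hv | hv
        · subst hv
          refine ⟨by simpa [List.isEmpty_iff] using h, ?_⟩
          intro d hd; exact hcur d (by simpa using hd)
        · exact hacc _ hv
    · simp only [PySem.Chars.split₀.go, hsp, if_false] at hw
      refine ih (c :: cur) acc ?_ hacc w hw
      intro d hd
      rcases List.mem_cons.mp hd with hd | hd
      · subst hd; simpa using hsp
      · exact hcur d hd

lemma pvSplit₀_good (s : List Char) : ∀ w ∈ PySem.Chars.split₀ s, pvGood w := by
  have := pvSplit₀_go_good s [] [] (by simp) (by simp)
  simpa [PySem.Chars.split₀] using this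

-- the trailing-space accumulation
def pvJoinT (ws : List (List Char)) : List Char := ws.flatMap (fun w => w ++ [' '])

lemma pvJoinT_eq (ws : List (List Char)) (h : ws ≠ []) :
    pvJoinT ws = PySem.Chars.join [' '] ws ++ [' '] := by
  induction ws with
  | nil => simp at h
  | cons w ws ih =>
    cases ws with
    | nil => simp [pvJoinT, PySem.Chars.join_singleton]
    | cons v vs =>
      simp only [pvJoinT, List.flatMap_cons] at *
      rw [ih (by simp), PySem.Chars.join_cons_cons]
      simp

-- strip (x ++ ' ') = strip x
lemma pvRstrip_append_space (x : List Char) :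
    PySem.Chars.rstrip (x ++ [' ']) = PySem.Chars.rstrip x := by
  simp [PySem.Chars.rstrip, PySem.Chars.isspace]

lemma pvStrip_append_space (x : List Char) :
    PySem.Chars.strip (x ++ [' ']) = PySem.Chars.strip x := by
  unfold PySem.Chars.strip PySem.Chars.lstrip
  rw [List.dropWhile_append]
  by_cases h : (x.dropWhile PySem.Chars.isspace).isEmpty
  · rw [if_pos h, List.isEmpty_iff.mp h,
      show List.dropWhile PySem.Chars.isspace [' '] = [] from by decide]
  · simp only [h, if_neg, Bool.false_eq_true, not_false_iff, if_false]
    exact pvRstrip_append_space _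

lemma pvRstrip_rstrip (y : List Char) :
    PySem.Chars.rstrip (PySem.Chars.rstrip y) = PySem.Chars.rstrip y := by
  simp [PySem.Chars.rstrip, List.dropWhile_idempotent]

lemma pvRstrip_prefix (y : List Char) : PySem.Chars.rstrip y <+: y := by
  have h := List.dropWhile_suffix (l := y.reverse) PySem.Chars.isspace
  unfold PySem.Chars.rstrip
  simpa using h.reverse

lemma pvLstrip_head (x : List Char) (c : Char) (t : List Char)
    (h : x.dropWhile PySem.Chars.isspace = c :: t) : PySem.Chars.isspace c = false := by
  have := List.head_dropWhile_not PySem.Chars.isspace (l := x) (by simp [h])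
  simpa [h] using this

lemma pvLstrip_rstrip_lstrip (x : List Char) :
    PySem.Chars.lstrip (PySem.Chars.rstrip (PySem.Chars.lstrip x))
      = PySem.Chars.rstrip (PySem.Chars.lstrip x) := by
  cases hr : PySem.Chars.rstrip (PySem.Chars.lstrip x) with
  | nil => simp [PySem.Chars.lstrip]
  | cons c t =>
    have hpre : PySem.Chars.rstrip (PySem.Chars.lstrip x) <+: PySem.Chars.lstrip x :=
      pvRstrip_prefix _
    rw [hr] at hpre
    obtain ⟨u, hu⟩ := hpre
    have hc : PySem.Chars.isspace c = false := by
      apply pvLstrip_head x c (t ++ u)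
      simpa [PySem.Chars.lstrip] using hu.symm
    simp [PySem.Chars.lstrip, List.dropWhile_cons_of_neg, hc]

-- strip is idempotent
lemma pvStrip_strip (x : List Char) :
    PySem.Chars.strip (PySem.Chars.strip x) = PySem.Chars.strip x := by
  show PySem.Chars.rstrip (PySem.Chars.lstrip (PySem.Chars.rstrip (PySem.Chars.lstrip x))) = _
  rw [pvLstrip_rstrip_lstrip, pvRstrip_rstrip]
  rfl

-- strip of a good join is itself
lemma pvJoin_cons_head (w : List Char) (ws : List (List Char)) :
    ∃ t, PySem.Chars.join [' '] (w :: ws) = w ++ t := by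
  cases ws with
  | nil => exact ⟨[], by simp [PySem.Chars.join_singleton]⟩
  | cons v vs => exact ⟨[' '] ++ PySem.Chars.join [' '] (v :: vs), by
      rw [PySem.Chars.join_cons_cons]; simp⟩

lemma pvJoin_reverse_head (ws : List (List Char)) (hg : ∀ w ∈ ws, pvGood w) (hne : ws ≠ []) :
    ∃ c t, (PySem.Chars.join [' '] ws).reverse = c :: t ∧ PySem.Chars.isspace c = false := by
  induction ws with
  | nil => simp at hne
  | cons w vs ih =>
    cases vs with
    | nil =>
      obtain ⟨hw, hsp⟩ := hg w (by simp)
      rw [PySem.Chars.join_singleton]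
      cases hwr : w.reverse with
      | nil => simp_all
      | cons c t =>
        refine ⟨c, t, rfl, hsp c ?_⟩
        have : c ∈ w.reverse := by simp [hwr]
        simpa using this
    | cons v vs' =>
      obtain ⟨c, t, hct, hc⟩ := ih (fun u hu => hg u (by simp [hu])) (by simp)
      rw [PySem.Chars.join_cons_cons]
      exact ⟨c, t ++ (' ' :: w.reverse), by simp [hct], hc⟩

lemma pvStrip_join (ws : List (List Char)) (hg : ∀ w ∈ ws, pvGood w) :
    PySem.Chars.strip (PySem.Chars.join [' '] ws) = PySem.Chars.join [' '] ws := by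
  cases ws with
  | nil => simp [PySem.Chars.join_nil]; rfl
  | cons w vs =>
    obtain ⟨t0, ht0⟩ := pvJoin_cons_head w vs
    obtain ⟨hw, hwsp⟩ := hg w (by simp)
    obtain ⟨c, t, hct, hc⟩ := pvJoin_reverse_head (w :: vs) hg (by simp)
    show PySem.Chars.rstrip (PySem.Chars.lstrip _) = _
    have hl : PySem.Chars.lstrip (w ++ t0) = w ++ t0 := by
      obtain ⟨d, u, rfl⟩ := List.exists_cons_of_ne_nil hw
      have hd : PySem.Chars.isspace d = false := hwsp d (by simp)
      simp [PySem.Chars.lstrip, List.dropWhile_cons_of_neg, hd]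
    rw [ht0, hl, ← ht0]
    unfold PySem.Chars.rstrip
    rw [hct, List.dropWhile_cons_of_neg (by simp [hc]), ← hct, List.reverse_reverse]

lemma pvSplitGo_word (w : List Char) (hsp : ∀ c ∈ w, PySem.Chars.isspace c = false) :
    ∀ rest cur acc, PySem.Chars.split₀.go (w ++ rest) cur acc
      = PySem.Chars.split₀.go rest (w.reverse ++ cur) acc := by
  induction w with
  | nil => intro rest cur acc; simp
  | cons c t ih =>
    intro rest cur acc
    have hc : PySem.Chars.isspace c = false := hsp c (by simp)
    show PySem.Chars.split₀.go (c :: (t ++ rest)) cur acc = _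
    rw [PySem.Chars.split₀.go]
    simp only [hc, Bool.false_eq_true, if_false]
    rw [ih (fun d hd => hsp d (by simp [hd]))]
    simp

lemma pvSplitGo_space (rest cur : List Char) (acc : List (List Char)) (h : cur ≠ []) :
    PySem.Chars.split₀.go (' ' :: rest) cur acc
      = PySem.Chars.split₀.go rest [] (cur.reverse :: acc) := by
  rw [PySem.Chars.split₀.go]
  simp [show PySem.Chars.isspace ' ' = true from by decide, List.isEmpty_iff, h]

lemma pvSplitGo_nil (cur : List Char) (acc : List (List Char)) (h : cur ≠ []) :
    PySem.Chars.split₀.go [] cur acc = acc.reverse ++ [cur.reverse] := by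
  rw [PySem.Chars.split₀.go]
  simp [List.isEmpty_iff, h]

lemma pvSplitGo_join (ws : List (List Char)) (hg : ∀ w ∈ ws, pvGood w) :
    ∀ acc, PySem.Chars.split₀.go (PySem.Chars.join [' '] ws) [] acc = acc.reverse ++ ws := by
  induction ws with
  | nil =>
    intro acc
    rw [PySem.Chars.join_nil, PySem.Chars.split₀.go]
    simp
  | cons w vs ih =>
    intro acc
    obtain ⟨hw, hwsp⟩ := hg w (by simp)
    cases vs with
    | nil =>
      rw [PySem.Chars.join_singleton, show w = w ++ [] from by simp,
        pvSplitGo_word w hwsp [] [] acc]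
      rw [pvSplitGo_nil _ _ (by simpa using hw)]
      simp
    | cons v vs' =>
      rw [PySem.Chars.join_cons_cons]
      rw [List.append_assoc, pvSplitGo_word w hwsp _ [] acc]
      rw [show [' '] ++ PySem.Chars.join [' '] (v :: vs') = ' ' :: PySem.Chars.join [' '] (v :: vs') from rfl]
      rw [pvSplitGo_space _ _ _ (by simpa using hw)]
      rw [ih (fun u hu => hg u (by simp [hu]))]
      simp

-- split() inverts ' '.join on good words
lemma pvSplit₀_join (ws : List (List Char)) (hg : ∀ w ∈ ws, pvGood w) :
    PySem.Chars.split₀ (PySem.Chars.join [' '] ws) = ws := by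
  unfold PySem.Chars.split₀
  simpa using pvSplitGo_join ws hg []

lemma pvPrefix_space (old l : List Char) (hsp : ' ' ∉ old)
    (h : old.isPrefixOf (l ++ [' ']) = true) : old.isPrefixOf l = true := by
  rw [List.isPrefixOf_iff_prefix] at h ⊢
  rcases Nat.lt_or_ge old.length (l ++ [' ']).length with hlt | hge
  · exact List.prefix_of_prefix_length_le h (List.prefix_append l [' ']) (by
      simpa using Nat.lt_succ_iff.mp (by simpa using hlt))
  · have : old = l ++ [' '] := h.eq_of_length (le_antisymm (h.length_le) hge)
    exact absurd (by simp [this] : ' ' ∈ old) hsp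

lemma pvReplaceGo_fuel (old new : List Char) (h0 : old ≠ []) :
    ∀ n m (l : List Char) acc, l.length ≤ n → l.length ≤ m →
      PySem.Chars.replace.go old new n l acc = PySem.Chars.replace.go old new m l acc := by
  intro n
  induction n with
  | zero =>
    intro m l acc hn _
    have : l = [] := List.eq_nil_of_length_eq_zero (Nat.le_zero.mp hn)
    subst this
    cases m <;> simp [PySem.Chars.replace.go]
  | succ n ih =>
    intro m l acc hn hm
    cases l with
    | nil => cases m <;> simp [PySem.Chars.replace.go]
    | cons c t =>
      cases m with
      | zero => simp at hm
      | succ m =>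
        rw [PySem.Chars.replace.go, PySem.Chars.replace.go]
        by_cases hp : old.isPrefixOf (c :: t)
        · simp only [hp, if_true]
          have hlen : (List.drop old.length (c :: t)).length ≤ n := by
            have h1 : 1 ≤ old.length := by
              cases old with | nil => exact absurd rfl h0 | cons _ _ => simp
            simp only [List.length_drop]
            omega
          have hlen' : (List.drop old.length (c :: t)).length ≤ m := by
            have h1 : 1 ≤ old.length := by
              cases old with | nil => exact absurd rfl h0 | cons _ _ => simp
            simp only [List.length_drop]
            omega
          exact ih m _ _ hlen hlen'
        · simp only [hp, Bool.false_eq_true, if_false]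
          exact ih m t _ (by simpa using Nat.lt_succ_iff.mp (by simpa using hn))
            (by simpa using Nat.lt_succ_iff.mp (by simpa using hm))

lemma pvReplaceGo_cons (old new : List Char) (c : Char) (t acc : List Char) (n : ℕ) :
    PySem.Chars.replace.go old new (n+1) (c :: t) acc
      = if old.isPrefixOf (c :: t) then
          PySem.Chars.replace.go old new n (List.drop old.length (c :: t)) (new.reverse ++ acc)
        else PySem.Chars.replace.go old new n t (c :: acc) := rfl

lemma pvReplaceGo_nil (old new : List Char) :
    ∀ n acc, PySem.Chars.replace.go old new n [] acc = acc.reverse := by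
  intro n acc; cases n <;> simp [PySem.Chars.replace.go]

lemma pvReplaceGo_space (old new : List Char) (h0 : old ≠ []) (hsp : ' ' ∉ old) :
    ∀ n (l : List Char) acc, l.length + 1 ≤ n →
      PySem.Chars.replace.go old new n (l ++ [' ']) acc
        = PySem.Chars.replace.go old new n l acc ++ [' '] := by
  intro n
  induction n with
  | zero => intro l acc h; omega
  | succ n ih =>
    intro l acc h
    have h1 : 1 ≤ old.length := by
      cases old with | nil => exact absurd rfl h0 | cons _ _ => simp
    cases l with
    | nil =>
      have hp : old.isPrefixOf [' '] = false := by
        cases hq : old.isPrefixOf [' '] with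
        | false => rfl
        | true =>
          exfalso
          rw [List.isPrefixOf_iff_prefix] at hq
          have : old = [' '] := by
            have hle : old.length ≤ 1 := by simpa using hq.length_le
            exact hq.eq_of_length (by simp; omega)
          exact hsp (by simp [this])
      rw [show ([] : List Char) ++ [' '] = [' '] from rfl, pvReplaceGo_cons]
      rw [if_neg (by simp [hp])]
      rw [pvReplaceGo_nil, pvReplaceGo_nil]
      simp
    | cons c t =>
      rw [show (c :: t) ++ [' '] = c :: (t ++ [' ']) from rfl, PySem.Chars.replace.go,
        PySem.Chars.replace.go]
      by_cases hp : old.isPrefixOf (c :: (t ++ [' ']))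
      · have hpl : old.isPrefixOf (c :: t) = true :=
          pvPrefix_space old (c :: t) hsp (by simpa using hp)
        have hol : old.length ≤ (c :: t).length := by
          have := (List.isPrefixOf_iff_prefix.mp hpl).length_le
          simpa using this
        simp only [hp, hpl, if_true]
        rw [show c :: (t ++ [' ']) = (c :: t) ++ [' '] from rfl,
          List.drop_append_of_le_length hol]
        have hlen : (List.drop old.length (c :: t)).length + 1 ≤ n := by
          simp only [List.length_drop]
          simp only [List.length_cons] at *
          omega
        exact ih _ _ hlen
      · have hpl : old.isPrefixOf (c :: t) = false := by
          cases hq : old.isPrefixOf (c :: t) with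
          | false => rfl
          | true =>
            exfalso
            apply hp
            rw [List.isPrefixOf_iff_prefix] at hq ⊢
            exact hq.trans (by rw [show c :: (t ++ [' ']) = (c :: t) ++ [' '] from rfl]; exact List.prefix_append _ _)
        simp only [hp, hpl, Bool.false_eq_true, if_false]
        exact ih t (c :: acc) (by simp only [List.length_cons] at h ⊢; omega)

-- replace with a space-free pattern commutes with appending a space
lemma pvReplace_append_space (x old new : List Char) (h0 : old ≠ []) (hsp : ' ' ∉ old) :
    PySem.Chars.replace (x ++ [' ']) old new = PySem.Chars.replace x old new ++ [' '] := by
  unfold PySem.Chars.replace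
  rw [if_neg (by simpa [List.isEmpty_iff] using h0), if_neg (by simpa [List.isEmpty_iff] using h0)]
  simp only [List.length_append, List.length_singleton]
  rw [pvReplaceGo_space old new h0 hsp _ x [] (by simp)]
  rw [pvReplaceGo_fuel old new h0 (x.length + 1) x.length x [] (by omega) le_rfl]

lemma pvBDiff_iff (w : List Char) :
    pvBDiff w = true ↔ (w = "Easy".toList ∨ w = "Medium".toList ∨ w = "Hard".toList) := by
  simp [pvBDiff, or_assoc]

lemma pvBDiff_stop (w : List Char) (h : pvBDiff w = true) : pvBStop w = false := by
  rcases (pvBDiff_iff w).mp h with h | h | h <;> subst h <;> decide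

-- step equations for A's loop
lemma pvALoop_cons_diff (sec : String) (d p t pd w : List Char) (rest : List (List Char))
    (h : w = "Easy".toList ∨ w = "Medium".toList ∨ w = "Hard".toList) :
    pvALoop sec d p t pd (w :: rest) = pvALoop "topics" w p t pd rest := by
  simp only [pvALoop]; rw [if_pos h]

lemma pvALoop_cons_ex (sec : String) (d p t pd w : List Char) (rest : List (List Char))
    (h1 : ¬(w = "Easy".toList ∨ w = "Medium".toList ∨ w = "Hard".toList))
    (h2 : PySem.Chars.startswith w "Example".toList = true) :
    pvALoop sec d p t pd (w :: rest) = (d, p, t, pd, [pvAEx (w :: rest)], []) := by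
  simp only [pvALoop]; rw [if_neg h1, if_pos (by simpa using h2)]

lemma pvALoop_cons_con (sec : String) (d p t pd w : List Char) (rest : List (List Char))
    (h1 : ¬(w = "Easy".toList ∨ w = "Medium".toList ∨ w = "Hard".toList))
    (h2 : PySem.Chars.startswith w "Example".toList = false)
    (h3 : w = "Constraints:".toList) :
    pvALoop sec d p t pd (w :: rest) = (d, p, t, pd, [], PySem.Chars.join [' '] (w :: rest)) := by
  simp only [pvALoop]; rw [if_neg h1, if_neg (by simpa using h2), if_pos h3]

lemma pvALoop_cons_acc_title (d p t pd w : List Char) (rest : List (List Char))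
    (h1 : ¬(w = "Easy".toList ∨ w = "Medium".toList ∨ w = "Hard".toList))
    (h2 : PySem.Chars.startswith w "Example".toList = false)
    (h3 : w ≠ "Constraints:".toList) :
    pvALoop "title" d p t pd (w :: rest) = pvALoop "title" d (p ++ w ++ [' ']) t pd rest := by
  simp only [pvALoop]; rw [if_neg h1, if_neg (by simpa using h2), if_neg h3]; simp

lemma pvALoop_cons_acc_topics (d p t pd w : List Char) (rest : List (List Char))
    (h1 : ¬(w = "Easy".toList ∨ w = "Medium".toList ∨ w = "Hard".toList))
    (h2 : PySem.Chars.startswith w "Example".toList = false)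
    (h3 : w ≠ "Constraints:".toList) :
    pvALoop "topics" d p t pd (w :: rest) = pvALoop "topics" d p (t ++ w ++ [' ']) pd rest := by
  simp only [pvALoop]
  rw [if_neg h1, if_neg (by simpa using h2), if_neg h3]; simp

def pvEvTail (d pid t pd : List Char) :
    List (List Char) → List Char × List Char × List Char × List Char × List (List Char) × List Char
  | [] => (d, pid, t, pd, [], [])
  | w :: rs =>
    if PySem.Chars.startswith w "Example".toList then (d, pid, t, pd, [pvAEx (w :: rs)], [])
    else (d, pid, t, pd, [], PySem.Chars.join [' '] (w :: rs))

def pvTitleTail (d pid t pd : List Char) :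
    List (List Char) → List Char × List Char × List Char × List Char × List (List Char) × List Char
  | [] => (d, pid, t, pd, [], [])
  | w :: rs => if pvBDiff w then pvALoop "topics" w pid t pd rs else pvEvTail d pid t pd (w :: rs)

lemma pvEvTail_nil (d pid t pd : List Char) :
    pvEvTail d pid t pd [] = (d, pid, t, pd, [], []) := rfl

lemma pvEvTail_ex (d pid t pd w : List Char) (rs : List (List Char))
    (h : PySem.Chars.startswith w "Example".toList = true) :
    pvEvTail d pid t pd (w :: rs) = (d, pid, t, pd, [pvAEx (w :: rs)], []) := by
  rw [show ("Example".toList : List Char) = ['E','x','a','m','p','l','e'] from by decide] at h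
  simp [pvEvTail, h]

lemma pvEvTail_con (d pid t pd w : List Char) (rs : List (List Char))
    (h : PySem.Chars.startswith w "Example".toList = false) :
    pvEvTail d pid t pd (w :: rs) = (d, pid, t, pd, [], PySem.Chars.join [' '] (w :: rs)) := by
  rw [show ("Example".toList : List Char) = ['E','x','a','m','p','l','e'] from by decide] at h
  simp [pvEvTail, h]

lemma pvTitleTail_diff (d pid t pd w : List Char) (rs : List (List Char))
    (h : pvBDiff w = true) :
    pvTitleTail d pid t pd (w :: rs) = pvALoop "topics" w pid t pd rs := by
  simp [pvTitleTail, h]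

lemma pvTitleTail_ev (d pid t pd w : List Char) (rs : List (List Char))
    (h : pvBDiff w = false) :
    pvTitleTail d pid t pd (w :: rs) = pvEvTail d pid t pd (w :: rs) := by
  simp [pvTitleTail, h]

lemma pvALoop_topics (ws : List (List Char)) : ∀ d p t pd,
    pvALoop "topics" d p t pd ws =
      pvEvTail (((ws.takeWhile (fun w => !pvBStop w)).filter pvBDiff).getLastD d) p
        (t ++ pvJoinT ((ws.takeWhile (fun w => !pvBStop w)).filter (fun w => !pvBDiff w))) pd
        (ws.dropWhile (fun w => !pvBStop w)) := by
  induction ws with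
  | nil => intro d p t pd; simp [pvALoop, pvJoinT, pvEvTail, pvTitleTail]
  | cons w rest ih =>
    intro d p t pd
    by_cases hd : pvBDiff w
    · have hs : pvBStop w = false := pvBDiff_stop w hd
      have hprop : w = "Easy".toList ∨ w = "Medium".toList ∨ w = "Hard".toList :=
        (pvBDiff_iff w).mp hd
      rw [pvALoop_cons_diff _ _ _ _ _ _ _ hprop, ih w p t pd]
      simp only [List.takeWhile_cons, List.dropWhile_cons, hs, hd, Bool.not_false,
        Bool.not_true, Bool.false_eq_true, Bool.true_eq_false, if_true, if_false,
        List.filter_cons, List.getLastD_cons]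
    · by_cases hs : pvBStop w
      · have hnd : ¬(w = "Easy".toList ∨ w = "Medium".toList ∨ w = "Hard".toList) := by
          simpa [pvBDiff_iff] using hd
        by_cases hex : PySem.Chars.startswith w "Example".toList
        · have hexl : PySem.Chars.startswith w ['E','x','a','m','p','l','e'] = true := by
            simpa using hex
          rw [pvALoop_cons_ex _ _ _ _ _ _ _ hnd hex]
          simp [List.takeWhile_cons, List.dropWhile_cons, hs, hexl, pvJoinT, pvEvTail, pvTitleTail]
        · have hexf : PySem.Chars.startswith w "Example".toList = false := by
            simpa using hex
          have hexl : PySem.Chars.startswith w ['E','x','a','m','p','l','e'] = false := by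
            simpa using hex
          have hcon : w = "Constraints:".toList := by
            have hs' := hs
            simp [pvBStop, hexl] at hs'
            simpa using hs'
          rw [pvALoop_cons_con _ _ _ _ _ _ _ hnd hexf hcon]
          simp [List.takeWhile_cons, List.dropWhile_cons, hs, hexl, pvJoinT, pvEvTail, pvTitleTail]
      · have hnd : ¬(w = "Easy".toList ∨ w = "Medium".toList ∨ w = "Hard".toList) := by
          simpa [pvBDiff_iff] using hd
        have hex : PySem.Chars.startswith w "Example".toList = false := by
          cases hq : PySem.Chars.startswith w "Example".toList with
          | false => rfl
          | true => exact absurd (by simp [pvBStop]; exact Or.inl (by simpa using hq)) hs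
        have hcon : w ≠ "Constraints:".toList := by
          intro hq
          exact absurd (by simp [pvBStop]; exact Or.inr (by simpa using hq)) hs
        rw [pvALoop_cons_acc_topics _ _ _ _ _ _ hnd hex hcon, ih]
        simp only [List.takeWhile_cons, List.dropWhile_cons, hs, hd, Bool.not_false,
          Bool.false_eq_true, if_false, if_true, Bool.not_eq_true]
        simp [List.filter_cons, hd, pvJoinT]

lemma pvALoop_title (ws : List (List Char)) : ∀ d p t pd,
    pvALoop "title" d p t pd ws =
      pvTitleTail d (p ++ pvJoinT (ws.takeWhile (fun w => !(pvBDiff w || pvBStop w)))) t pd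
        (ws.dropWhile (fun w => !(pvBDiff w || pvBStop w))) := by
  induction ws with
  | nil => intro d p t pd; simp [pvALoop, pvJoinT, pvEvTail, pvTitleTail]
  | cons w rest ih =>
    intro d p t pd
    by_cases hd : pvBDiff w
    · have hprop := (pvBDiff_iff w).mp hd
      rw [pvALoop_cons_diff _ _ _ _ _ _ _ hprop]
      simp [List.dropWhile_cons, List.takeWhile_cons, hd, pvJoinT, pvEvTail, pvTitleTail]
    · by_cases hs : pvBStop w
      · have hnd : ¬(w = "Easy".toList ∨ w = "Medium".toList ∨ w = "Hard".toList) := by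
          simpa [pvBDiff_iff] using hd
        by_cases hex : PySem.Chars.startswith w "Example".toList
        · have hexl : PySem.Chars.startswith w ['E','x','a','m','p','l','e'] = true := by
            simpa using hex
          rw [pvALoop_cons_ex _ _ _ _ _ _ _ hnd hex]
          simp [List.dropWhile_cons, List.takeWhile_cons, hd, hs, hexl, pvJoinT, pvEvTail, pvTitleTail]
        · have hexf : PySem.Chars.startswith w "Example".toList = false := by
            simpa using hex
          have hexl : PySem.Chars.startswith w ['E','x','a','m','p','l','e'] = false := by
            simpa using hex
          have hcon : w = "Constraints:".toList := by
            have hs' := hs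
            simp [pvBStop, hexl] at hs'
            simpa using hs'
          rw [pvALoop_cons_con _ _ _ _ _ _ _ hnd hexf hcon]
          simp [List.dropWhile_cons, List.takeWhile_cons, hd, hs, hexl, pvJoinT, pvEvTail, pvTitleTail]
      · have hnd : ¬(w = "Easy".toList ∨ w = "Medium".toList ∨ w = "Hard".toList) := by
          simpa [pvBDiff_iff] using hd
        have hex : PySem.Chars.startswith w "Example".toList = false := by
          cases hq : PySem.Chars.startswith w "Example".toList with
          | false => rfl
          | true => exact absurd (by simp [pvBStop]; exact Or.inl (by simpa using hq)) hs
        have hcon : w ≠ "Constraints:".toList := by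
          intro hq
          exact absurd (by simp [pvBStop]; exact Or.inr (by simpa using hq)) hs
        rw [pvALoop_cons_acc_title _ _ _ _ _ _ hnd hex hcon, ih]
        simp only [List.dropWhile_cons, List.takeWhile_cons, hd, hs, Bool.or_self,
          Bool.not_false, Bool.false_eq_true, if_false, if_true]
        simp [pvJoinT]

lemma pvStrip_nil : PySem.Chars.strip [] = [] := rfl

lemma pvJoin_ne_nil (w : List Char) (hw : w ≠ []) (ws : List (List Char)) :
    PySem.Chars.join [' '] (w :: ws) ≠ [] := by
  obtain ⟨t, ht⟩ := pvJoin_cons_head w ws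
  rw [ht]
  simp [hw]

lemma pvTopics_eq (tws : List (List Char)) :
    PySem.Chars.strip (PySem.Chars.replace (pvJoinT tws) "Topics".toList [])
      = PySem.Chars.strip (PySem.Chars.replace (PySem.Chars.join [' '] tws) "Topics".toList []) := by
  cases tws with
  | nil => rfl
  | cons a l =>
    rw [pvJoinT_eq _ (by simp), pvReplace_append_space _ _ _ (by decide) (by decide),
      pvStrip_append_space]

lemma pvDropWhile_head_false {α : Type} (p : α → Bool) (l : List α) (a : α) (t : List α)
    (h : l.dropWhile p = a :: t) : p a = false := by
  have h1 : (l.dropWhile p).head? = some a := by rw [h]; rfl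
  induction l with
  | nil => simp at h
  | cons x xs ih =>
    by_cases hx : p x
    · rw [List.dropWhile_cons_of_pos hx] at h h1; exact ih h h1
    · rw [List.dropWhile_cons_of_neg hx] at h
      cases h; simpa using hx

theorem pvPorts_eq (text : String) (hpre : Pre_parse_and_format_problem text) :
    parse_and_format_problem text = parse_and_format_problem_alt text := by
  obtain ⟨hne, hhead⟩ := hpre
  have hg := pvSplit₀_good text.toList
  unfold parse_and_format_problem parse_and_format_problem_alt
  generalize hws : PySem.Chars.split₀ text.toList = ws at hne hhead hg ⊢
  obtain ⟨w0, ws0, rfl⟩ := List.exists_cons_of_ne_nil hne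
  simp only [List.headD_cons] at hhead
  obtain ⟨hnd0, hex0, hcon0⟩ := hhead
  have hexl0 : PySem.Chars.startswith w0 ['E','x','a','m','p','l','e'] = false := by
    simpa using hex0
  have hconl0 : ¬ w0 = ['C','o','n','s','t','r','a','i','n','t','s',':'] := by
    simpa using hcon0
  have hd0 : pvBDiff w0 = false := by
    cases hq : pvBDiff w0 with
    | false => rfl
    | true => exact absurd ((pvBDiff_iff w0).mp hq) hnd0
  have hs0 : pvBStop w0 = false := by simp [pvBStop, hexl0, hconl0]
  have hP0 : (!(pvBDiff w0 || pvBStop w0)) = true := by simp [hd0, hs0]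
  have hgood0 : pvGood w0 := hg w0 (by simp)
  have hgood_id : ∀ x ∈ w0 :: List.takeWhile (fun w => !(pvBDiff w || pvBStop w)) ws0, pvGood x := by
    intro x hx
    rcases List.mem_cons.mp hx with hx | hx
    · subst hx; exact hgood0
    · exact hg x (List.mem_cons_of_mem _ ((List.takeWhile_sublist _).subset hx))
  have hidD : ∀ x ∈ w0 :: List.takeWhile (fun w => !(pvBDiff w || pvBStop w)) ws0,
      (!pvBDiff x) = true := by
    intro x hx
    rcases List.mem_cons.mp hx with hx | hx
    · subst hx; simp [hd0]
    · have := List.mem_takeWhile_imp hx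
      simp at this
      simp [this.1]
  have hidS : ∀ x ∈ w0 :: List.takeWhile (fun w => !(pvBDiff w || pvBStop w)) ws0,
      (!pvBStop x) = true := by
    intro x hx
    rcases List.mem_cons.mp hx with hx | hx
    · subst hx; simp [hs0]
    · have := List.mem_takeWhile_imp hx
      simp at this
      simp [this.2]
  have hpid : PySem.Chars.split₀ (PySem.Chars.strip
      (pvJoinT (w0 :: List.takeWhile (fun w => !(pvBDiff w || pvBStop w)) ws0)))
      = w0 :: List.takeWhile (fun w => !(pvBDiff w || pvBStop w)) ws0 := by
    rw [pvJoinT_eq _ (by simp), pvStrip_append_space, pvStrip_join _ hgood_id,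
      pvSplit₀_join _ hgood_id]
  simp only [pvALoop_title]
  rw [List.takeWhile_cons_of_pos (p := fun w => !(pvBDiff w || pvBStop w)) (l := ws0) hP0,
    List.dropWhile_cons_of_pos (p := fun w => !(pvBDiff w || pvBStop w)) (l := ws0) hP0]
  cases hrest : List.dropWhile (fun w => !(pvBDiff w || pvBStop w)) ws0 with
  | nil =>
    -- no difficulty keyword and no Example/Constraints token anywhere
    have hall : ∀ x ∈ ws0, (!(pvBDiff x || pvBStop x)) = true := by
      intro x hx
      have := List.dropWhile_eq_nil_iff.mp hrest
      simpa using this x hx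
    have htws : List.takeWhile (fun w => !(pvBDiff w || pvBStop w)) ws0 = ws0 :=
      List.takeWhile_eq_self_iff.mpr hall
    rw [htws] at hpid hgood_id hidD hidS ⊢
    have hheadB : List.takeWhile (fun w => !pvBStop w) (w0 :: ws0) = w0 :: ws0 :=
      List.takeWhile_eq_self_iff.mpr hidS
    have htailB : List.dropWhile (fun w => !pvBStop w) (w0 :: ws0) = [] :=
      List.dropWhile_eq_nil_iff.mpr hidS
    have hidB : List.takeWhile (fun w => !pvBDiff w) (w0 :: ws0) = w0 :: ws0 :=
      List.takeWhile_eq_self_iff.mpr hidD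
    have htrB : List.dropWhile (fun w => !pvBDiff w) (w0 :: ws0) = [] :=
      List.dropWhile_eq_nil_iff.mpr hidD
    have hfilB : List.filter pvBDiff (w0 :: ws0) = [] := by
      rw [List.filter_eq_nil_iff]
      intro x hx
      simpa using hidD x hx
    rw [hheadB, htailB, hidB, htrB, hfilB]
    simp [hpid, PySem.List.enumerate, pvStrip_nil, pvTitleTail]
  | cons w rs =>
    have hwfail : (!(pvBDiff w || pvBStop w)) = false :=
      pvDropWhile_head_false (fun w => !(pvBDiff w || pvBStop w)) ws0 w rs hrest
    have hsplit : ws0 = List.takeWhile (fun w => !(pvBDiff w || pvBStop w)) ws0 ++ w :: rs := by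
      conv_lhs => rw [← List.takeWhile_append_dropWhile
        (p := fun w => !(pvBDiff w || pvBStop w)) (l := ws0)]
      rw [hrest]
    by_cases hdw : pvBDiff w
    · -- difficulty keyword found: A switches to the topics loop
      have hsw : pvBStop w = false := pvBDiff_stop w hdw
      rw [pvTitleTail_diff _ _ _ _ _ _ hdw]
      simp only [pvALoop_topics]
      have hheadB : List.takeWhile (fun w => !pvBStop w) (w0 :: ws0)
          = (w0 :: List.takeWhile (fun w => !(pvBDiff w || pvBStop w)) ws0)
            ++ w :: List.takeWhile (fun w => !pvBStop w) rs := by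
        rw [show w0 :: ws0 = (w0 :: List.takeWhile (fun w => !(pvBDiff w || pvBStop w)) ws0)
            ++ w :: rs from by rw [List.cons_append, ← hsplit]]
        rw [List.takeWhile_append_of_pos hidS, List.takeWhile_cons_of_pos (by simp [hsw])]
      have htailB : List.dropWhile (fun w => !pvBStop w) (w0 :: ws0)
          = List.dropWhile (fun w => !pvBStop w) rs := by
        rw [show w0 :: ws0 = (w0 :: List.takeWhile (fun w => !(pvBDiff w || pvBStop w)) ws0)
            ++ w :: rs from by rw [List.cons_append, ← hsplit]]
        rw [List.dropWhile_append_of_pos hidS, List.dropWhile_cons_of_pos (by simp [hsw])]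
      rw [hheadB, htailB]
      have hidB : List.takeWhile (fun w => !pvBDiff w)
          ((w0 :: List.takeWhile (fun w => !(pvBDiff w || pvBStop w)) ws0)
            ++ w :: List.takeWhile (fun w => !pvBStop w) rs)
          = w0 :: List.takeWhile (fun w => !(pvBDiff w || pvBStop w)) ws0 := by
        rw [List.takeWhile_append_of_pos hidD, List.takeWhile_cons_of_neg (by simp [hdw])]
        simp
      have htrB : List.dropWhile (fun w => !pvBDiff w)
          ((w0 :: List.takeWhile (fun w => !(pvBDiff w || pvBStop w)) ws0)
            ++ w :: List.takeWhile (fun w => !pvBStop w) rs)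
          = w :: List.takeWhile (fun w => !pvBStop w) rs := by
        rw [List.dropWhile_append_of_pos hidD, List.dropWhile_cons_of_neg (by simp [hdw])]
      have hfilB : List.filter pvBDiff
          ((w0 :: List.takeWhile (fun w => !(pvBDiff w || pvBStop w)) ws0)
            ++ w :: List.takeWhile (fun w => !pvBStop w) rs)
          = w :: List.filter pvBDiff (List.takeWhile (fun w => !pvBStop w) rs) := by
        rw [List.filter_append, List.filter_eq_nil_iff.mpr
          (fun x hx => by simpa using hidD x hx), List.filter_cons_of_pos hdw]
        simp
      have htop : List.filter (fun w => !pvBDiff w)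
          (w :: List.takeWhile (fun w => !pvBStop w) rs)
          = List.filter (fun w => !pvBDiff w) (List.takeWhile (fun w => !pvBStop w) rs) := by
        simp [List.filter_cons, hdw]
      simp only [List.nil_append]
      rw [hidB, htrB, hfilB, List.getLastD_cons, htop]
      cases htl : List.dropWhile (fun w => !pvBStop w) rs with
      | nil =>
        rw [pvEvTail_nil]
        dsimp only
        rw [pvTopics_eq]
        simp only [Bool.not_or] at hpid
        simp [hpid, PySem.List.enumerate, pvStrip_nil]
      | cons u us =>
        have hsu : pvBStop u = true := by
          simpa using pvDropWhile_head_false (fun w => !pvBStop w) rs u us htl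
        by_cases hexu : PySem.Chars.startswith u "Example".toList
        · have hucl : ¬ u = ['C','o','n','s','t','r','a','i','n','t','s',':'] := by
            intro h; rw [h] at hexu; exact absurd hexu (by decide)
          rw [pvEvTail_ex _ _ _ _ _ _ hexu]
          dsimp only
          rw [pvTopics_eq]
          simp only [Bool.not_or] at hpid
          simp [hpid, PySem.List.enumerate, pvStrip_nil, pvAEx, pvStrip_strip, hucl,
            show PySem.Int.toChars 1 = ['1'] from by decide]
        · have hexf : PySem.Chars.startswith u "Example".toList = false := by
            simpa using hexu
          have huc : u = ['C','o','n','s','t','r','a','i','n','t','s',':'] := by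
            have h := hsu
            simp [pvBStop, (by simpa using hexu :
              PySem.Chars.startswith u ['E','x','a','m','p','l','e'] = false)] at h
            simpa using h
          subst huc
          rw [pvEvTail_con _ _ _ _ _ _ hexf]
          dsimp only
          rw [pvTopics_eq]
          simp only [Bool.not_or] at hpid
          have hjn : PySem.Chars.join [' ']
              (['C','o','n','s','t','r','a','i','n','t','s',':'] :: us) ≠ [] :=
            pvJoin_ne_nil _ (by decide) us
          simp [hpid, PySem.List.enumerate, pvStrip_nil, hjn]
    · -- first event is an Example*/'Constraints:' token: A stops in the title phase
      have hdwf : pvBDiff w = false := by simpa using hdw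
      have hsw : pvBStop w = true := by
        have h := hwfail
        simp [hdwf] at h
        exact h
      rw [pvTitleTail_ev _ _ _ _ _ _ hdwf]
      have hheadB : List.takeWhile (fun w => !pvBStop w) (w0 :: ws0)
          = w0 :: List.takeWhile (fun w => !(pvBDiff w || pvBStop w)) ws0 := by
        rw [show w0 :: ws0 = (w0 :: List.takeWhile (fun w => !(pvBDiff w || pvBStop w)) ws0)
            ++ w :: rs from by rw [List.cons_append, ← hsplit]]
        rw [List.takeWhile_append_of_pos hidS, List.takeWhile_cons_of_neg (by simp [hsw])]
        simp
      have htailB : List.dropWhile (fun w => !pvBStop w) (w0 :: ws0) = w :: rs := by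
        rw [show w0 :: ws0 = (w0 :: List.takeWhile (fun w => !(pvBDiff w || pvBStop w)) ws0)
            ++ w :: rs from by rw [List.cons_append, ← hsplit]]
        rw [List.dropWhile_append_of_pos hidS, List.dropWhile_cons_of_neg (by simp [hsw])]
      rw [hheadB, htailB]
      have hidB : List.takeWhile (fun w => !pvBDiff w)
          (w0 :: List.takeWhile (fun w => !(pvBDiff w || pvBStop w)) ws0)
          = w0 :: List.takeWhile (fun w => !(pvBDiff w || pvBStop w)) ws0 :=
        List.takeWhile_eq_self_iff.mpr hidD
      have htrB : List.dropWhile (fun w => !pvBDiff w)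
          (w0 :: List.takeWhile (fun w => !(pvBDiff w || pvBStop w)) ws0) = [] :=
        List.dropWhile_eq_nil_iff.mpr hidD
      have hfilB : List.filter pvBDiff
          (w0 :: List.takeWhile (fun w => !(pvBDiff w || pvBStop w)) ws0) = [] := by
        rw [List.filter_eq_nil_iff]
        intro x hx
        simpa using hidD x hx
      rw [hidB, htrB, hfilB]
      by_cases hexw : PySem.Chars.startswith w "Example".toList
      · have hwcl : ¬ w = ['C','o','n','s','t','r','a','i','n','t','s',':'] := by
          intro h; rw [h] at hexw; exact absurd hexw (by decide)
        rw [pvEvTail_ex _ _ _ _ _ _ hexw]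
        simp only [Bool.not_or] at hpid
        simp [hpid, PySem.List.enumerate, pvStrip_nil, pvAEx, pvStrip_strip, hwcl,
          show PySem.Int.toChars 1 = ['1'] from by decide]
      · have hexf : PySem.Chars.startswith w "Example".toList = false := by
          simpa using hexw
        have hwc : w = ['C','o','n','s','t','r','a','i','n','t','s',':'] := by
          have h := hsw
          simp [pvBStop, (by simpa using hexw :
            PySem.Chars.startswith w ['E','x','a','m','p','l','e'] = false)] at h
          simpa using h
        subst hwc
        rw [pvEvTail_con _ _ _ _ _ _ hexf]
        simp only [Bool.not_or] at hpid
        have hjn : PySem.Chars.join [' ']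
            (['C','o','n','s','t','r','a','i','n','t','s',':'] :: rs) ≠ [] :=
          pvJoin_ne_nil _ (by decide) rs
        simp [hpid, PySem.List.enumerate, pvStrip_nil, hjn]

-- ===== VERDICT (by name: the statement is the Claim_ definition above) =====
theorem parse_and_format_problem_spec : Claim_equal_parse_and_format_problem := by
  intro problem_text _ hpre
  unfold Spec_parse_and_format_problem
  exact pvPorts_eq problem_text hpre
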